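-- pv_equiv track=rewrite | github.com/Fionan-Oxford/ML-Mini-projects | problems/island_perimeter.py | _top_bottom_sweep
-- ===== SOURCE A (Python) =====
-- from typing import List
--
-- def _top_bottom_sweep(grid: List[List[int]]) -> int:
--
--     tb_per = 0
--
--     sweep = [0 for _ in range(len(grid[0]))]
--
--     for row in grid:
--         for count, value in enumerate(row):
--             tb_per += abs(sweep[count] - value)
--         sweep = row
--
--     tb_per += sum(sweep)
--     return tb_per
-- ===== SOURCE B (Python) =====
-- from typing import List
--
-- def _top_bottom_sweep(grid: List[List[int]]) -> int:
--     # Every horizontal boundary segment is crossed once stepping up and once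
--     # stepping down, so the top/bottom perimeter equals twice the total upward
--     # jump seen while scanning each column from the zero border downward.
--     total = 0
--     for c in range(len(grid[0])):
--         prev = 0
--         for row in grid:
--             if row[c] > prev:
--                 total += row[c] - prev
--             prev = row[c]
--     return 2 * total
-- ===== Notes on version B (the rewrite author's own statement) =====
-- stated objective: alternative
-- what changed: Instead of accumulating column-wise absolute differences against a rolling previous-row buffer and then adding sum(last row), B counts only the upward transitions per column (scanning from a zero border) and doubles the total; Pre_ excludes ragged grids, where A's partial-column accounting is accidental and B's per-column indexing raises IndexError.
-- outside the precondition, e.g. on _top_bottom_sweep([[1, 1], [1]]): A returns 3, B raises IndexError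
import Mathlib
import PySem

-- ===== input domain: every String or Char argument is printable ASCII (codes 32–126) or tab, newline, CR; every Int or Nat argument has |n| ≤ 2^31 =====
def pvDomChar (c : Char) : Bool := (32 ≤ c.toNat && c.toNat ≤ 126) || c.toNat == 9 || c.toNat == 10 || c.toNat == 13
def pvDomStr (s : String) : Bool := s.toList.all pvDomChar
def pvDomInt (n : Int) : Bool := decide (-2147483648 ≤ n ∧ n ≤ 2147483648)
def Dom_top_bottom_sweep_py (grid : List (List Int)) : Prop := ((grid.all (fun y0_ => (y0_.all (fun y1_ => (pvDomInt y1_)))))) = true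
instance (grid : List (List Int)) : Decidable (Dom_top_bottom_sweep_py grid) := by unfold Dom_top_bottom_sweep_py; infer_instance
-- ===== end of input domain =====

-- B counts only upward transitions per column and doubles the total, instead of A's
-- rolling previous-row buffer of absolute differences plus a final sum of the last row.


-- ===== PORT A =====
def top_bottom_sweep_py (grid : List (List Int)) : Int :=
  let sweep0 : List Int := (List.range (grid.headD []).length).map (fun _ => (0 : Int))
  let st := grid.foldl
    (fun (st : Int × List Int) row =>
      ((PySem.List.enumerate row 0).foldl
        (fun tb cv => tb + |PySem.List.pyGetD st.2 cv.1 0 - cv.2|) st.1, row))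
    ((0 : Int), sweep0)
  st.1 + st.2.sum

-- ===== PORT B =====
def top_bottom_sweep_py_alt (grid : List (List Int)) : Int :=
  let total := (List.range (grid.headD []).length).foldl
    (fun total c =>
      (grid.foldl
        (fun (st : Int × Int) row =>
          let v := row.getD c 0   -- row[c]; Pre_ guarantees c < row.length
          (if v > st.2 then st.1 + (v - st.2) else st.1, v))
        (total, 0)).1)
    0
  2 * total

-- ===== PRECONDITION & SPEC =====
-- Pre_ excludes the empty grid (grid[0] raises in both) and ragged grids: there A's
-- partial-column accounting via the leftover sweep buffer is accidental (or raises),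
-- and B's per-column indexing row[c] itself raises IndexError.
def Pre_top_bottom_sweep_py (grid : List (List Int)) : Prop :=
  grid ≠ [] ∧ ∀ row ∈ grid, row.length = (grid.headD []).length
instance (grid : List (List Int)) : Decidable (Pre_top_bottom_sweep_py grid) := by
  unfold Pre_top_bottom_sweep_py; infer_instance

def pvWitness_top_bottom_sweep_py : List (List Int) := [[0, 1, 1], [1, 1, 0]]

def Spec_top_bottom_sweep_py (grid : List (List Int)) (out : Int) : Prop := out = top_bottom_sweep_py_alt grid
instance (grid : List (List Int)) (out : Int) : Decidable (Spec_top_bottom_sweep_py grid out) := by unfold Spec_top_bottom_sweep_py; infer_instance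

-- ===== CLAIM (what is proved, stated in full; the proofs are below) =====
def Claim_equal_top_bottom_sweep_py : Prop := ∀ (grid : List (List Int)), Dom_top_bottom_sweep_py grid → Pre_top_bottom_sweep_py grid → Spec_top_bottom_sweep_py grid (top_bottom_sweep_py grid)

-- ===== LEMMAS AND PROOFS =====

-- per-column value of A: absolute transitions from prev, plus the last value seen
def pvF (prev : Int) : List Int → Int
  | [] => prev
  | v :: rest => |prev - v| + pvF v rest

-- per-column value of B: the upward transitions only
def pvG (prev : Int) : List Int → Int
  | [] => 0
  | v :: rest => (if v > prev then v - prev else 0) + pvG v rest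

theorem pvF_eq_two_G (l : List Int) (prev : Int) : pvF prev l = 2 * pvG prev l + prev := by
  induction l generalizing prev with
  | nil => simp [pvF, pvG]
  | cons v rest ih =>
      simp only [pvF, pvG, ih v]
      rcases abs_cases (prev - v) with ⟨h1, _⟩ | ⟨h1, _⟩ <;> rw [h1] <;> split_ifs <;> omega

-- abstract recursive form of A's row loop
def pvArun (s : List Int) : List (List Int) → Int
  | [] => s.sum
  | row :: rest =>
      ((List.range row.length).map (fun c => |s.getD c 0 - row.getD c 0|)).sum + pvArun row rest

theorem pvInner_enum (s row : List Int) (k : Nat) :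
    ((PySem.List.enumerate row (k : Int)).map
        (fun cv => |PySem.List.pyGetD s cv.1 0 - cv.2|)).sum
      = ((List.range row.length).map (fun c => |s.getD (k + c) 0 - row.getD c 0|)).sum := by
  induction row generalizing k with
  | nil => simp [PySem.List.enumerate_nil]
  | cons v rest ih =>
      have hk : (k : Int) + 1 = ((k + 1 : Nat) : Int) := by push_cast; ring
      simp only [PySem.List.enumerate_cons, List.map_cons, List.sum_cons,
        List.length_cons, List.range_succ_eq_map, List.map_map]
      rw [hk, ih (k + 1)]
      simp [PySem.List.pyGetD_natCast, Function.comp_def, Nat.add_comm, Nat.add_left_comm]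

theorem pvFoldA (rows : List (List Int)) (s : List Int) (tb : Int) :
    (rows.foldl
      (fun (st : Int × List Int) row =>
        ((PySem.List.enumerate row 0).foldl
          (fun tb cv => tb + |PySem.List.pyGetD st.2 cv.1 0 - cv.2|) st.1, row))
      (tb, s)).1
    + (rows.foldl
      (fun (st : Int × List Int) row =>
        ((PySem.List.enumerate row 0).foldl
          (fun tb cv => tb + |PySem.List.pyGetD st.2 cv.1 0 - cv.2|) st.1, row))
      (tb, s)).2.sum = tb + pvArun s rows := by
  induction rows generalizing s tb with
  | nil => simp [pvArun]
  | cons row rest ih =>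
      simp only [List.foldl_cons]
      rw [ih row]
      rw [PySem.List.foldl_add (PySem.List.enumerate row 0)
        (fun cv => |PySem.List.pyGetD s cv.1 0 - cv.2|) tb]
      have hIE := pvInner_enum s row 0
      simp only [Nat.cast_zero, zero_add] at hIE
      rw [hIE]
      simp [pvArun, add_assoc]

theorem pvMap_range_getD (s : List Int) :
    (List.range s.length).map (fun c => s.getD c 0) = s := by
  apply List.ext_getElem (by simp)
  intro i h1 h2
  simp [List.getD_eq_getElem?_getD, List.getElem?_eq_getElem h2]

-- rectangularity condition used in the column decomposition
def pvRect (w : Nat) (rows : List (List Int)) : Prop := ∀ row ∈ rows, row.length = w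

-- A's row loop equals the sum over columns of pvF
theorem pvArun_cols (rows : List (List Int)) (w : Nat) (s : List Int)
    (hs : s.length = w) (hr : pvRect w rows) :
    pvArun s rows = ((List.range w).map (fun c => pvF (s.getD c 0) (rows.map (fun row => row.getD c 0)))).sum := by
  induction rows generalizing s with
  | nil =>
      simp only [pvArun, List.map_nil, pvF]
      conv_lhs => rw [← pvMap_range_getD s]
      rw [hs]
  | cons row rest ih =>
      have hrow : row.length = w := hr row (by simp)
      have hrest : pvRect w rest := fun r hrmem => hr r (by simp [hrmem])
      simp only [pvArun, List.map_cons, pvF]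
      rw [ih row hrow hrest, hrow, ← List.sum_map_add]

-- B's inner fold computes pvG on the column
theorem pvFoldB (rows : List (List Int)) (c : Nat) (t p : Int) :
    (rows.foldl
      (fun (st : Int × Int) row =>
        let v := row.getD c 0
        (if v > st.2 then st.1 + (v - st.2) else st.1, v))
      (t, p)).1 = t + pvG p (rows.map (fun row => row.getD c 0)) := by
  induction rows generalizing t p with
  | nil => simp [pvG]
  | cons row rest ih =>
      simp only [List.foldl_cons, List.map_cons, pvG]
      rw [ih]
      split_ifs <;> ring

-- ===== VERDICT (by name: the statement is the Claim_ definition above) =====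
theorem top_bottom_sweep_py_spec : Claim_equal_top_bottom_sweep_py := by
  intro grid _ hpre
  obtain ⟨hne, hrect⟩ := hpre
  unfold Spec_top_bottom_sweep_py top_bottom_sweep_py top_bottom_sweep_py_alt
  set w := (grid.headD []).length with hw
  set z : List Int := (List.range w).map (fun _ => (0 : Int)) with hz
  have hzlen : z.length = w := by simp [hz]
  have hzget : ∀ c : Nat, z.getD c 0 = 0 := by
    intro c
    by_cases hc : c < w
    · simp [hz, List.getD_eq_getElem?_getD]
    · simp [hz, List.getD_eq_getElem?_getD]
  have hA := pvFoldA grid z 0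
  simp only [zero_add] at hA
  rw [hA, pvArun_cols grid w z hzlen hrect]
  have hBfold : ∀ (l : List Nat) (t : Int),
      l.foldl (fun total c =>
        (grid.foldl
          (fun (st : Int × Int) row =>
            let v := row.getD c 0
            (if v > st.2 then st.1 + (v - st.2) else st.1, v))
          (total, 0)).1) t
      = t + (l.map (fun c => pvG 0 (grid.map (fun row => row.getD c 0)))).sum := by
    intro l
    induction l with
    | nil => simp
    | cons c rest ih =>
        intro t
        simp only [List.foldl_cons, List.map_cons, List.sum_cons]
        rw [pvFoldB, ih]
        ring
  rw [hBfold, zero_add]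
  show _ = 2 * (List.map (fun c => pvG 0 (grid.map (fun row => row.getD c 0))) (List.range w)).sum
  have hmap : (List.range w).map (fun c => pvF (z.getD c 0) (grid.map (fun row => row.getD c 0)))
      = (List.range w).map (fun c => 2 * pvG 0 (grid.map (fun row => row.getD c 0))) :=
    List.map_congr_left (fun c _ => by rw [hzget c, pvF_eq_two_G, add_zero])
  rw [hmap, List.sum_map_mul_left]
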